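-- pv_equiv track=rewrite | github.com/JingtaoWang22/BN_proj | CombineComorbidity.py | MergeCommorbidities
-- ===== SOURCE A (Python) =====
-- def MergeCommorbidities( commorbidities ):
--     combined = []
--     for i in range( len( commorbidities[0] ) ):
--         total = 0
--         for j in range( len( commorbidities ) ):
--             if ( str(commorbidities[j][i]) != "-999" ):
--                 total += 1
--         combined.append( total )
--     return combined
-- ===== SOURCE B (Python) =====
-- def MergeCommorbidities(commorbidities):
--     nrows = len(commorbidities)
--     missing = [i for row in commorbidities
--                  for i, v in enumerate(row) if str(v) == "-999"]
--     return [nrows - missing.count(i) for i in range(len(commorbidities[0]))]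
-- ===== Notes on version B (the rewrite author's own statement) =====
-- stated objective: alternative
-- what changed: B counts by complement: one flatten pass collects the column indices of all -999 cells into a list, and each output entry is nrows - missing.count(i); no per-column rescans of the rows and no running totals.
import Mathlib
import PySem

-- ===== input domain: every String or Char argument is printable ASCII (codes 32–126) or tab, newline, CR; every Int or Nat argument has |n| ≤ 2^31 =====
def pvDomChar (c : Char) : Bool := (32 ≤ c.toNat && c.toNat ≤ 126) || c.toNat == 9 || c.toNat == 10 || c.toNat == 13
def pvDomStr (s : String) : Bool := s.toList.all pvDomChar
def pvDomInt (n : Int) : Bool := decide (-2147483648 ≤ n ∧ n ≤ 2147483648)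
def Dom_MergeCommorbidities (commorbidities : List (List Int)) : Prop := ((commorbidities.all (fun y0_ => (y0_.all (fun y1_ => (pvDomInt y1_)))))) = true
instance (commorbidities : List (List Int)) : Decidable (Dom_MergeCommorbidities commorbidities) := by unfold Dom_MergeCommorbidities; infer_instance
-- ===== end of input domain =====

-- B counts by complement: it flattens the table once into the list of column indices of the
-- missing (-999) cells, then returns nrows - missing.count(i) per column (objective: alternative).

-- ===== PORT A =====
-- A: for i in range(len(cs[0])): total = 0; for j in range(len(cs)): if str(cs[j][i]) != "-999": total += 1; append
def MergeCommorbidities (commorbidities : List (List Int)) : List Int :=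
  (PySem.List.pyRange 0 ((PySem.List.pyGetD commorbidities 0 ([] : List Int)).length : Int) 1).foldl
    (fun combined i =>
      combined ++ [(PySem.List.pyRange 0 (commorbidities.length : Int) 1).foldl
        (fun total j =>
          if PySem.Int.toStr (PySem.List.pyGetD (PySem.List.pyGetD commorbidities j ([] : List Int)) i 0) ≠ "-999"
          then total + 1 else total) 0])
    []

-- ===== PORT B =====
-- B: nrows = len(cs); missing = [i for row in cs for i, v in enumerate(row) if str(v) == "-999"];
--    return [nrows - missing.count(i) for i in range(len(cs[0]))]
def MergeCommorbidities_alt (commorbidities : List (List Int)) : List Int :=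
  let nrows : Int := commorbidities.length
  let missing : List Int :=
    commorbidities.flatMap (fun row =>
      ((PySem.List.enumerate row).filter (fun p => PySem.Int.toStr p.2 == "-999")).map (·.1))
  (PySem.List.pyRange 0 ((PySem.List.pyGetD commorbidities 0 ([] : List Int)).length : Int) 1).map
    (fun i => nrows - (missing.count i : Int))

-- ===== PRECONDITION & SPEC =====
-- Pre_ excludes exactly the inputs where the Python raises IndexError: the empty list
-- (commorbidities[0]) and ragged inputs where some row is shorter than the first row.
def Pre_MergeCommorbidities (commorbidities : List (List Int)) : Prop :=
  commorbidities ≠ [] ∧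
    ∀ row ∈ commorbidities, (commorbidities.headD []).length ≤ row.length
instance (commorbidities : List (List Int)) : Decidable (Pre_MergeCommorbidities commorbidities) := by
  unfold Pre_MergeCommorbidities; infer_instance
def pvWitness_MergeCommorbidities : List (List Int) := [[1, -999], [2, 3]]

def Spec_MergeCommorbidities (commorbidities : List (List Int)) (out : List Int) : Prop := out = MergeCommorbidities_alt commorbidities
instance (commorbidities : List (List Int)) (out : List Int) : Decidable (Spec_MergeCommorbidities commorbidities out) := by unfold Spec_MergeCommorbidities; infer_instance

-- ===== CLAIM (what is proved, stated in full; the proofs are below) =====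
def Claim_equal_MergeCommorbidities : Prop := ∀ (commorbidities : List (List Int)), Dom_MergeCommorbidities commorbidities → Pre_MergeCommorbidities commorbidities → Spec_MergeCommorbidities commorbidities (MergeCommorbidities commorbidities)

-- ===== LEMMAS AND PROOFS =====

-- A's per-cell counting step and its column count over the rows
def pvStep (i : Int) (t : Int) (row : List Int) : Int :=
  if PySem.Int.toStr (PySem.List.pyGetD row i 0) ≠ "-999" then t + 1 else t

def pvCnt (rows : List (List Int)) (i : Int) : Int := rows.foldl (pvStep i) 0

-- B's per-row missing-index list
def pvMiss (row : List Int) : List Int :=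
  ((PySem.List.enumerate row).filter (fun p => PySem.Int.toStr p.2 == "-999")).map (·.1)

theorem A_eq (cs : List (List Int)) :
    MergeCommorbidities cs =
      (List.range (PySem.List.pyGetD cs 0 ([] : List Int)).length).map
        (fun (k : Nat) => pvCnt cs (k : Int)) := by
  unfold MergeCommorbidities
  have h1 : ∀ (i : Int),
      (PySem.List.pyRange 0 (cs.length : Int) 1).foldl
        (fun total j =>
          if PySem.Int.toStr (PySem.List.pyGetD (PySem.List.pyGetD cs j ([] : List Int)) i 0) ≠ "-999"
          then total + 1 else total) 0 = pvCnt cs i := by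
    intro i
    exact PySem.List.foldl_pyRange_zero_pyGetD' cs ([] : List Int) (pvStep i) 0
  simp only [h1]
  rw [PySem.List.foldl_append_singleton_eq_map (pvCnt cs), PySem.List.pyRange_zero_nat,
    List.map_map]
  simp [Function.comp]

-- every first component of enumerate xs s is ≥ s
theorem enum_fst_ge {α : Type} (xs : List α) (s : Int) (p : Int × α)
    (hp : p ∈ PySem.List.enumerate xs s) : s ≤ p.1 := by
  obtain ⟨k, hk, rfl⟩ := (PySem.List.mem_enumerate_iff xs s p).mp hp
  simp

-- count of index s + k in one row's missing list, shifted start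
theorem miss_count_gen (row : List Int) :
    ∀ (s : Int) (k : Nat), k < row.length →
      (((PySem.List.enumerate row s).filter (fun p => PySem.Int.toStr p.2 == "-999")).map (·.1)).count (s + (k : Int))
        = if PySem.Int.toStr (row.getD k 0) = "-999" then 1 else 0 := by
  induction row with
  | nil => intro s k hk; simp at hk
  | cons v rest ih =>
    intro s k hk
    rw [PySem.List.enumerate_cons]
    cases k with
    | zero =>
      have hz : ((((PySem.List.enumerate rest (s + 1)).filter
            (fun p => PySem.Int.toStr p.2 == "-999")).map (·.1)).count s) = 0 := by
        rw [List.count_eq_zero]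
        intro hmem
        obtain ⟨p, hp, hp1⟩ := List.mem_map.mp hmem
        have := enum_fst_ge rest (s + 1) p (List.mem_filter.mp hp).1
        omega
      simp only [Nat.cast_zero, add_zero, List.getD_cons_zero]
      by_cases hv : PySem.Int.toStr v = "-999"
      · have hb : (PySem.Int.toStr v == "-999") = true := by simpa using hv
        simp only [List.filter_cons, hb, if_true, List.map_cons, List.count_cons]
        rw [hz, if_pos hv]
        simp
      · have hb : (PySem.Int.toStr v == "-999") = false := by simpa using hv
        simp only [List.filter_cons, hb, Bool.false_eq_true, if_false, hz, hv, if_false]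
    | succ k =>
      have hk' : k < rest.length := by simpa using hk
      have := ih (s + 1) k hk'
      by_cases hv : PySem.Int.toStr v = "-999"
      · simp only [List.filter_cons, hv, beq_self_eq_true, if_true, List.map_cons,
          List.count_cons]
        rw [show s + 1 + (k : Int) = s + ((k + 1 : Nat) : Int) from by push_cast; ring] at this
        simp only [List.getD_cons_succ] at this ⊢
        rw [this]
        have hne : (s == s + ((k + 1 : Nat) : Int)) = false := by
          simp only [beq_eq_false_iff_ne, ne_eq]; push_cast; omega
        rw [hne]
        simp
      · simp only [List.filter_cons]
        have : (PySem.Int.toStr v == "-999") = false := by simpa using hv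
        rw [this]
        simp only [Bool.false_eq_true, if_false]
        rw [show s + ((k + 1 : Nat) : Int) = (s + 1) + ((k : Nat) : Int) from by push_cast; ring]
        rw [ih (s + 1) k hk']
        simp

theorem miss_count (row : List Int) (k : Nat) (hk : k < row.length) :
    ((pvMiss row).count (k : Int) : Int)
      = if PySem.Int.toStr (row.getD k 0) = "-999" then 1 else 0 := by
  unfold pvMiss
  have := miss_count_gen row 0 k hk
  rw [zero_add] at this
  rw [this]
  split_ifs <;> rfl

-- shifting the accumulator of A's inner fold
theorem pvCnt_shift (cs : List (List Int)) (i : Int) :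
    ∀ t, cs.foldl (pvStep i) t = t + pvCnt cs i := by
  induction cs with
  | nil => intro t; simp [pvCnt]
  | cons row rest ih =>
    intro t
    simp only [pvCnt, List.foldl_cons] at *
    rw [ih (pvStep i t row), ih (pvStep i 0 row)]
    unfold pvStep
    split_ifs <;> ring

-- the complement identity: present count + missing count = number of rows
theorem main_identity (cs : List (List Int)) (k : Nat)
    (h : ∀ row ∈ cs, k < row.length) :
    pvCnt cs (k : Int) + ((cs.flatMap pvMiss).count (k : Int) : Int) = cs.length := by
  induction cs with
  | nil => simp [pvCnt]
  | cons row rest ih =>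
    have hrow : k < row.length := h row (List.mem_cons_self)
    have hrest : ∀ r ∈ rest, k < r.length := fun r hr => h r (List.mem_cons_of_mem _ hr)
    have hcnt : pvCnt (row :: rest) (k : Int) = pvStep (k : Int) 0 row + pvCnt rest (k : Int) := by
      simp only [pvCnt, List.foldl_cons]
      exact pvCnt_shift rest (k : Int) (pvStep (k : Int) 0 row)
    rw [hcnt]
    rw [List.flatMap_cons, List.count_append]
    push_cast
    rw [miss_count row k hrow]
    have hsum := ih hrest
    push_cast at hsum
    have hstep : pvStep (k : Int) 0 row
        = if PySem.Int.toStr (row.getD k 0) = "-999" then 0 else 1 := by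
      unfold pvStep
      rw [PySem.List.pyGetD_natCast]
      split_ifs <;> simp_all
    rw [hstep]
    simp only [List.length_cons]
    split_ifs <;> push_cast <;> omega

-- ===== VERDICT (by name: the statement is the Claim_ definition above) =====
theorem MergeCommorbidities_spec : Claim_equal_MergeCommorbidities := by
  intro cs _ hpre
  unfold Spec_MergeCommorbidities
  rw [A_eq]
  unfold MergeCommorbidities_alt
  rw [PySem.List.pyRange_zero_nat, List.map_map]
  apply List.map_congr_left
  intro k hk
  have hkn : k < (PySem.List.pyGetD cs 0 ([] : List Int)).length := List.mem_range.mp hk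
  obtain ⟨hne, hlen⟩ := hpre
  have h0 : PySem.List.pyGetD cs 0 ([] : List Int) = cs.headD [] := by
    cases cs with
    | nil => simp at hne
    | cons a l => simp [PySem.List.pyGetD]
  have hall : ∀ row ∈ cs, k < row.length := by
    intro row hrow
    have := hlen row hrow
    rw [h0] at hkn
    omega
  have := main_identity cs k hall
  unfold pvMiss at this
  simp only [Function.comp]
  omega
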